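-- pv_equiv track=rewrite | github.com/catalin-enache/gists | algorithms/searching/boyer_moore.py | find_boyer_moore_2
-- ===== SOURCE A (Python) =====
-- def find_boyer_moore_2(text, patt):
--     n, m = len(text), len(patt)
--     if m == 0:
--         return 0
--     last = {}
--     for _ in range(len(patt)):
--         last[patt[_]] = _
--     indexes = []
--     shift = 0
--
--     while shift <= n - m:
--         k = m - 1
--         while k >= 0 and patt[k] == text[shift + k]:
--             k -= 1
--         if k < 0:
--             indexes.append(shift)
--             # continue over
--             if shift + m < n:
--                 next_char_last_occ = last.get(text[shift + m], -1)
--                 shift += m - next_char_last_occ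
--             else:
--                 shift += 1
--         else:
--             last_bad_char_occ = last.get(text[shift + k], -1)
--             # shift += max(1, k - last_bad_char_occ)
--             shift += k - last_bad_char_occ if last_bad_char_occ < k else 1
--     return indexes
-- ===== SOURCE B (Python) =====
-- def find_boyer_moore_2(text, patt):
--     n, m = len(text), len(patt)
--     return [i for i in range(n - m + 1) if text[i:i + m] == patt]
-- ===== Notes on version B (the rewrite author's own statement) =====
-- stated objective: simpler
-- what changed: Replaces the Boyer-Moore machinery (last-occurrence table, right-to-left inner scan, heuristic shifts) with a direct one-line scan that keeps every window start whose slice equals the pattern; in CPython the C-level slice comparison beats A's per-character Python loops.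
-- outside the precondition, e.g. on find_boyer_moore_2('abc', ''): A returns 0, B returns [0, 1, 2, 3]
import Mathlib
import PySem

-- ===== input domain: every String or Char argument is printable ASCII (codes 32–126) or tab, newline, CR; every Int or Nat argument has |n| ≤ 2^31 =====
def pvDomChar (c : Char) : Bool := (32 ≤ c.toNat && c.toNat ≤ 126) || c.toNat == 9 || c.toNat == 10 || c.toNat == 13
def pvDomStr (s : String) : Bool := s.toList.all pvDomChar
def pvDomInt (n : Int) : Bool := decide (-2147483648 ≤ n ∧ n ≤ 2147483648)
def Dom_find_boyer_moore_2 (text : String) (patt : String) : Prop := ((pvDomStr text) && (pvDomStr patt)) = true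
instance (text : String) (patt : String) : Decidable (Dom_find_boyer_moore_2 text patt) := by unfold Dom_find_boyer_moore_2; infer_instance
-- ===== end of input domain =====

-- B replaces the Boyer-Moore machinery with a direct filter of all window starts whose slice
-- equals the pattern (objective: simpler; no speed claim). Pre_ excludes the empty pattern,
-- on which A returns the int 0 instead of a list.

-- ===== PORT A =====

-- s[i] where every call site is provably in range (Python raises out of range; never reached here)
def pyChar (l : List Char) (i : Int) : Char := PySem.List.pyGetD l i ' '

-- 'last = {}; for _ in range(len(patt)): last[patt[_]] = _'
def bmLast (p : List Char) : PySem.Dict Char Int :=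
  (PySem.List.pyRange 0 (p.length : Int) 1).foldl (fun d i => d.insert (pyChar p i) i) PySem.Dict.empty

-- 'k = m - 1; while k >= 0 and patt[k] == text[shift + k]: k -= 1' ;  none = fell through (k < 0)
def bmInner (t p : List Char) (shift : Int) : Nat → Option Nat
  | 0 => if pyChar p 0 = pyChar t (shift + 0) then none else some 0
  | Nat.succ k =>
      if pyChar p ((k + 1 : Nat) : Int) = pyChar t (shift + ((k + 1 : Nat) : Int)) then
        bmInner t p shift k
      else some (k + 1)

-- the outer 'while shift <= n - m' loop; fuel bounds the iteration count (each step increases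
-- shift by at least 1, so (n - m + 1) iterations always suffice; fuel only makes the loop total)
def bmLoop (t p : List Char) (last : PySem.Dict Char Int) (n m : Int) :
    Nat → Int → List Int → List Int
  | 0, _, acc => acc
  | fuel + 1, shift, acc =>
      if shift ≤ n - m then
        match bmInner t p shift (m - 1).toNat with
        | none =>
            if shift + m < n then
              bmLoop t p last n m fuel
                (shift + (m - last.getD (pyChar t (shift + m)) (-1))) (acc ++ [shift])
            else
              bmLoop t p last n m fuel (shift + 1) (acc ++ [shift])
        | some k =>
            if last.getD (pyChar t (shift + (k : Int))) (-1) < (k : Int) then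
              bmLoop t p last n m fuel
                (shift + ((k : Int) - last.getD (pyChar t (shift + (k : Int))) (-1))) acc
            else
              bmLoop t p last n m fuel (shift + 1) acc
      else acc

def find_boyer_moore_2 (text : String) (patt : String) : List Int :=
  let t := text.toList
  let p := patt.toList
  let n : Int := t.length
  let m : Int := p.length
  if p.length = 0 then []   -- Python returns the int 0 here (not a list); excluded by Pre_
  else bmLoop t p (bmLast p) n m (n - m + 1).toNat 0 []

-- ===== PORT B =====
-- '[i for i in range(n - m + 1) if text[i:i + m] == patt]'
def find_boyer_moore_2_alt (text : String) (patt : String) : List Int :=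
  let t := text.toList
  let p := patt.toList
  (PySem.List.pyRange 0 ((t.length : Int) - (p.length : Int) + 1) 1).filter
    (fun i => PySem.List.slice t (some i) (some (i + (p.length : Int))) == p)

-- ===== PRECONDITION & SPEC =====
-- Pre_ excludes the empty pattern: there A returns the int 0, which is not a list of indexes.
def Pre_find_boyer_moore_2 (text : String) (patt : String) : Prop := patt.toList ≠ []
instance (text : String) (patt : String) : Decidable (Pre_find_boyer_moore_2 text patt) := by
  unfold Pre_find_boyer_moore_2; infer_instance

def pvWitness_find_boyer_moore_2 : String × String := ("abacabaa", "aba")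

def Spec_find_boyer_moore_2 (text : String) (patt : String) (out : List Int) : Prop := out = find_boyer_moore_2_alt text patt
instance (text : String) (patt : String) (out : List Int) : Decidable (Spec_find_boyer_moore_2 text patt out) := by unfold Spec_find_boyer_moore_2; infer_instance

-- ===== CLAIM (what is proved, stated in full; the proofs are below) =====
def Claim_equal_find_boyer_moore_2 : Prop := ∀ (text : String) (patt : String), Dom_find_boyer_moore_2 text patt → Pre_find_boyer_moore_2 text patt → Spec_find_boyer_moore_2 text patt (find_boyer_moore_2 text patt)

-- ===== LEMMAS AND PROOFS =====

-- generalised form of bmLast used to prove the facts the loop needs (cited by the port for termination)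
def bmLastN (p : List Char) (k : Nat) : PySem.Dict Char Int :=
  (PySem.List.pyRange 0 (k : Int) 1).foldl (fun d i => d.insert (pyChar p i) i) PySem.Dict.empty

lemma pyRange_one_nil {a b : Int} (h : b ≤ a) : PySem.List.pyRange a b = [] := by
  refine List.eq_nil_iff_forall_not_mem.mpr (fun x hx => ?_)
  have := PySem.List.mem_pyRange_one.mp hx; omega

lemma bmLastN_facts (p : List Char) (k : Nat) (c : Char) :
    (-1 : Int) ≤ (bmLastN p k).getD c (-1) ∧ (bmLastN p k).getD c (-1) < (k : Int) ∧
    (∀ j : Nat, j < k → pyChar p j = c → (j : Int) ≤ (bmLastN p k).getD c (-1)) := by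
  induction k with
  | zero =>
      unfold bmLastN
      rw [pyRange_one_nil (by simp)]
      simp [PySem.Dict.getD_empty]
  | succ k ih =>
      have hstep : bmLastN p (k + 1) = (bmLastN p k).insert (pyChar p (k : Nat)) (k : Nat) := by
        unfold bmLastN
        rw [show ((k + 1 : Nat) : Int) = (k : Int) + 1 by push_cast; ring,
            PySem.List.pyRange_one_succ_right (by omega), List.foldl_append]
        rfl
      rw [hstep, PySem.Dict.getD_insert]
      by_cases hc : c = pyChar p (k : Nat)
      · simp only [if_pos hc]
        refine ⟨by omega, by push_cast; omega, fun j hj _ => by exact_mod_cast Nat.lt_succ_iff.mp hj⟩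
      · simp only [if_neg hc]
        refine ⟨ih.1, by push_cast; omega, fun j hj hcj => ?_⟩
        have hjk : j < k := by
          rcases Nat.lt_succ_iff_lt_or_eq.mp hj with h | h
          · exact h
          · exact absurd (h ▸ hcj).symm hc
        exact ih.2.2 j hjk hcj

-- the three facts about the 'last' dict the loop's termination and the proofs use
lemma bmLast_spec (p : List Char) (c : Char) :
    (bmLast p).getD c (-1) < (p.length : Int) ∧ (-1 : Int) ≤ (bmLast p).getD c (-1) ∧
    (∀ j : Nat, j < p.length → pyChar p j = c → (j : Int) ≤ (bmLast p).getD c (-1)) := by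
  have h := bmLastN_facts p p.length c
  exact ⟨h.2.1, h.1, h.2.2⟩


-- pointwise form of 'the pattern matches at offset i'
def PW (t p : List Char) (i : Int) : Prop :=
  ∀ j : Nat, j < p.length → pyChar p ((j : Nat) : Int) = pyChar t (i + (j : Nat))

lemma slice_beq_iff_PW (t p : List Char) (i : Int) (h0 : 0 ≤ i)
    (h1 : i + (p.length : Int) ≤ (t.length : Int)) :
    ((PySem.List.slice t (some i) (some (i + (p.length : Int))) == p) = true) ↔ PW t p i := by
  obtain ⟨a, rfl⟩ : ∃ a : Nat, i = (a : Int) := ⟨i.toNat, (Int.toNat_of_nonneg h0).symm⟩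
  have han : a + p.length ≤ t.length := by exact_mod_cast h1
  rw [show (a : Int) + (p.length : Int) = ((a + p.length : Nat) : Int) by push_cast; ring,
      PySem.List.slice_natCast, Nat.add_sub_cancel_left, beq_iff_eq]
  have hlen : (List.take p.length (t.drop a)).length = p.length := by
    simp [List.length_take, List.length_drop]; omega
  constructor
  · intro h j hj
    unfold pyChar
    rw [show (a : Int) + ((j : Nat) : Int) = ((a + j : Nat) : Int) by push_cast; ring,
        PySem.List.pyGetD_natCast, PySem.List.pyGetD_natCast,
        List.getD_eq_getElem _ _ hj, List.getD_eq_getElem _ _ (show a + j < t.length by omega)]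
    have hgj : (List.take p.length (t.drop a)).getD j ' ' = p.getD j ' ' := by rw [h]
    rw [List.getD_eq_getElem _ _ (show j < (List.take p.length (t.drop a)).length by
          rw [hlen]; exact hj),
        List.getElem_take, List.getElem_drop, List.getD_eq_getElem _ _ hj] at hgj
    exact hgj.symm
  · intro h
    refine List.ext_getElem hlen (fun j hj1 hj2 => ?_)
    have hj : j < p.length := hj2
    have hjt : a + j < t.length := by omega
    have := h j hj
    unfold pyChar at this
    rw [show (a : Int) + ((j : Nat) : Int) = ((a + j : Nat) : Int) by push_cast; ring,
        PySem.List.pyGetD_natCast, PySem.List.pyGetD_natCast,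
        List.getD_eq_getElem _ _ hj, List.getD_eq_getElem _ _ hjt] at this
    rw [List.getElem_take, List.getElem_drop]
    exact this.symm

lemma bmInner_none_iff (t p : List Char) (shift : Int) (k : Nat) :
    bmInner t p shift k = none ↔
      ∀ j : Nat, j ≤ k → pyChar p ((j : Nat) : Int) = pyChar t (shift + (j : Nat)) := by
  induction k with
  | zero =>
      simp only [bmInner]
      split_ifs with h
      · simp only [true_iff]
        intro j hj; interval_cases j; exact h
      · simp only [reduceCtorEq, false_iff, not_forall]
        exact ⟨0, le_rfl, h⟩
  | succ k ih =>
      simp only [bmInner]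
      split_ifs with h
      · rw [ih]
        constructor
        · intro H j hj
          rcases Nat.lt_succ_iff_lt_or_eq.mp (Nat.lt_succ_of_le hj) with hlt | rfl
          · exact H j (Nat.lt_succ_iff.mp hlt)
          · exact h
        · exact fun H j hj => H j (Nat.le_succ_of_le hj)
      · simp only [reduceCtorEq, false_iff, not_forall]
        exact ⟨k + 1, le_rfl, h⟩

lemma bmInner_some (t p : List Char) (shift : Int) (k k0 : Nat) :
    bmInner t p shift k = some k0 →
      k0 ≤ k ∧ pyChar p ((k0 : Nat) : Int) ≠ pyChar t (shift + (k0 : Nat)) := by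
  induction k with
  | zero =>
      simp only [bmInner]
      split_ifs with h
      · simp
      · intro hk; cases hk; exact ⟨le_rfl, h⟩
  | succ k ih =>
      simp only [bmInner]
      split_ifs with h
      · exact fun hk => ⟨Nat.le_succ_of_le (ih hk).1, (ih hk).2⟩
      · intro hk; cases hk; exact ⟨le_rfl, h⟩

lemma filter_pyRange_skip (f : Int → Bool) (a b c : Int) (hab : a ≤ b)
    (hf : ∀ i, a ≤ i → i < b → i < c → f i = false) :
    (PySem.List.pyRange a c 1).filter f = (PySem.List.pyRange b c 1).filter f := by
  suffices key : ∀ N : Nat, ∀ a, a ≤ b → (b - a).toNat ≤ N →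
      (∀ i, a ≤ i → i < b → i < c → f i = false) →
      (PySem.List.pyRange a c 1).filter f = (PySem.List.pyRange b c 1).filter f by
    exact key (b - a).toNat a hab le_rfl hf
  intro N
  induction N with
  | zero =>
      intro a hab hN _
      have : a = b := by omega
      rw [this]
  | succ N ih =>
      intro a hab hN hf
      rcases eq_or_lt_of_le hab with rfl | hlt
      · rfl
      · by_cases hc : a < c
        · rw [PySem.List.pyRange_one_cons hc, List.filter_cons, hf a le_rfl hlt hc]
          simp only [Bool.false_eq_true, if_false]
          exact ih (a + 1) (by omega) (by omega) (fun i h1 h2 h3 => hf i (by omega) h2 h3)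
        · rw [pyRange_one_nil (by omega), pyRange_one_nil (by omega)]

-- no occurrence is skipped: if the last occurrence of c := t[s+e] in p is ≤ jv, the pattern
-- cannot match at any offset strictly between s and s + (e - jv)  (e = m after a hit, e = k after a miss)
lemma skip_safe (t p : List Char) (s e jv : Int) (he1 : 1 ≤ e)
    (he2 : e ≤ (p.length : Int)) (hjv : -1 ≤ jv)
    (hlast : ∀ j : Nat, j < p.length → pyChar p j = pyChar t (s + e) → (j : Int) ≤ jv) :
    ∀ i, s < i → i < s + (e - jv) → ¬ PW t p i := by
  intro i h1 h2 hPW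
  set d := i - s with hd
  have hd1 : 1 ≤ d := by omega
  have hd2 : d < e - jv := by omega
  set q : Nat := (e - d).toNat with hqdef
  have hq : (q : Int) = e - d := Int.toNat_of_nonneg (by omega)
  have hqm : q < p.length := by
    have : (q : Int) < (p.length : Int) := by omega
    exact_mod_cast this
  have hpw := hPW q hqm
  rw [show i + ((q : Nat) : Int) = s + e by omega] at hpw
  have := hlast q hqm hpw
  omega

lemma bmLoop_eq (t p : List Char) (last : PySem.Dict Char Int) (n m : Int)
    (hm : 1 ≤ m) (hlast : ∀ c, last.getD c (-1) < m ∧ (-1 : Int) ≤ last.getD c (-1))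
    (hn : n = (t.length : Int)) (hmp : m = (p.length : Int))
    (hlast2 : ∀ c, ∀ j : Nat, j < p.length → pyChar p j = c → (j : Int) ≤ last.getD c (-1)) :
    ∀ fuel shift acc, 0 ≤ shift → (n - m - shift + 1).toNat ≤ fuel →
      bmLoop t p last n m fuel shift acc =
        acc ++ (PySem.List.pyRange shift (n - m + 1) 1).filter
          (fun i => PySem.List.slice t (some i) (some (i + (p.length : Int))) == p) := by
  set f : Int → Bool :=
    fun i => PySem.List.slice t (some i) (some (i + (p.length : Int))) == p with hfdef
  have hbridge : ∀ i, 0 ≤ i → i ≤ n - m → (f i = true ↔ PW t p i) := fun i hi1 hi2 =>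
    slice_beq_iff_PW t p i hi1 (by omega)
  have hbridgeF : ∀ i, 0 ≤ i → i ≤ n - m → ¬ PW t p i → f i = false := fun i hi1 hi2 hnot =>
    Bool.eq_false_iff.mpr (fun hT => hnot ((hbridge i hi1 hi2).mp hT))
  have hm1 : ((m - 1).toNat : Int) = m - 1 := Int.toNat_of_nonneg (by omega)
  intro fuel
  induction fuel with
  | zero =>
      intro shift acc hs hN
      rw [show bmLoop t p last n m 0 shift acc = acc from rfl,
          pyRange_one_nil (by omega)]
      simp
  | succ fuel ih =>
      intro shift acc hs hN
      simp only [bmLoop]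
      by_cases h : shift ≤ n - m
      · rw [if_pos h]
        cases hinner : bmInner t p shift (m - 1).toNat with
        | none =>
            have hmatch : PW t p shift := by
              intro j hj
              refine (bmInner_none_iff t p shift (m - 1).toNat).mp hinner j ?_
              have : (j : Int) < m := by rw [hmp]; exact_mod_cast hj
              omega
            have hfs : f shift = true := (hbridge shift hs h).mpr hmatch
            rw [PySem.List.pyRange_one_cons (by omega : shift < n - m + 1),
                List.filter_cons, hfs]
            simp only [if_true]
            by_cases h2 : shift + m < n
            · rw [if_pos h2]
              set jv := last.getD (pyChar t (shift + m)) (-1) with hjv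
              have hjv1 : jv < m := (hlast _).1
              have hjv2 : -1 ≤ jv := (hlast _).2
              rw [ih (shift + (m - jv)) (acc ++ [shift]) (by omega) (by omega)]
              rw [← filter_pyRange_skip f (shift + 1) (shift + (m - jv)) (n - m + 1)
                    (by omega) (fun i hi1 hi2 hi3 => hbridgeF i (by omega) (by omega)
                      (skip_safe t p shift m jv hm (le_of_eq hmp) hjv2
                        (fun j hj hc => hlast2 _ j hj hc) i (by omega) hi2))]
              simp
            · rw [if_neg h2]
              rw [ih (shift + 1) (acc ++ [shift]) (by omega) (by omega)]
              simp
        | some k =>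
            obtain ⟨hk1, hk2⟩ := bmInner_some t p shift (m - 1).toNat k hinner
            have hkm : (k : Int) ≤ m - 1 := by
              have : (k : Int) ≤ ((m - 1).toNat : Int) := by exact_mod_cast hk1
              omega
            have hkp : k < p.length := by
              have : (k : Int) < (p.length : Int) := by omega
              exact_mod_cast this
            have hnomatch : ¬ PW t p shift := fun hPW => hk2 (hPW k hkp)
            have hfs : f shift = false := hbridgeF shift hs h hnomatch
            rw [PySem.List.pyRange_one_cons (by omega : shift < n - m + 1),
                List.filter_cons, hfs]
            simp only [Bool.false_eq_true, if_false]
            set jv := last.getD (pyChar t (shift + (k : Int))) (-1) with hjv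
            have hjv2 : -1 ≤ jv := (hlast _).2
            by_cases h3 : jv < (k : Int)
            · rw [if_pos h3]
              rw [ih (shift + ((k : Int) - jv)) acc (by omega) (by omega)]
              rw [← filter_pyRange_skip f (shift + 1) (shift + ((k : Int) - jv)) (n - m + 1)
                    (by omega) (fun i hi1 hi2 hi3 => hbridgeF i (by omega) (by omega)
                      (skip_safe t p shift (k : Int) jv (by omega)
                        (by exact_mod_cast Nat.le_of_lt hkp)
                        hjv2 (fun j hj hc => hlast2 _ j hj hc) i (by omega) hi2))]
            · rw [if_neg h3]
              rw [ih (shift + 1) acc (by omega) (by omega)]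
      · rw [if_neg h, pyRange_one_nil (by omega)]
        simp

-- ===== VERDICT (by name: the statement is the Claim_ definition above) =====
theorem find_boyer_moore_2_spec : Claim_equal_find_boyer_moore_2 := by
  intro text patt _ hpre
  unfold Pre_find_boyer_moore_2 at hpre
  unfold Spec_find_boyer_moore_2 find_boyer_moore_2 find_boyer_moore_2_alt
  have hlen : patt.toList.length ≠ 0 := fun h => hpre (List.length_eq_zero_iff.mp h)
  simp only [if_neg hlen]
  rw [bmLoop_eq text.toList patt.toList (bmLast patt.toList) _ _
        (by exact_mod_cast Nat.one_le_iff_ne_zero.mpr hlen)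
        (fun c => ⟨(bmLast_spec patt.toList c).1, (bmLast_spec patt.toList c).2.1⟩) rfl rfl
        (fun c => (bmLast_spec patt.toList c).2.2) _ 0 [] le_rfl (by omega)]
  simp
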